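-- pv_equiv track=rewrite | github.com/codingMMax/nl-dpe-fpl | fc_verification/results/plot_dimm_expanded.py | al_group
-- ===== SOURCE A (Python) =====
-- def al_group(bd):
--     # Azure-Lily uses dsp_gemm (QK^T, SV) + CLB (softmax) + ADC conversions
--     return {
--         "Crossbar (VMM)":   0,  # not used
--         "ACAM (exp/log)":   0,  # no ACAM
--         "CLB (add+reduce)": sum(v for k, v in bd.items() if "clb" in k),
--         "DSP (MAC)":        bd.get("dsp_gemm", 0) + bd.get("mul", 0)
--                             + bd.get("imc_conversion", 0),  # ADC cost on crossbar ops
--         "BRAM R/W":         bd.get("sram_read", 0) + bd.get("sram_write", 0),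
--     }
-- ===== SOURCE B (Python) =====
-- CATEGORY = {
--     "dsp_gemm": "DSP (MAC)",
--     "mul": "DSP (MAC)",
--     "imc_conversion": "DSP (MAC)",
--     "sram_read": "BRAM R/W",
--     "sram_write": "BRAM R/W",
-- }
--
-- def al_group(bd):
--     out = {
--         "Crossbar (VMM)":   0,
--         "ACAM (exp/log)":   0,
--         "CLB (add+reduce)": 0,
--         "DSP (MAC)":        0,
--         "BRAM R/W":         0,
--     }
--     for k, v in bd.items():
--         c = CATEGORY.get(k)
--         if c is None and "clb" in k:
--             c = "CLB (add+reduce)"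
--         if c is not None:
--             out[c] += v
--     return out
-- ===== Notes on version B (the rewrite author's own statement) =====
-- stated objective: alternative
-- what changed: Replaces the comprehension-sum plus five separate .get() lookups by a table-driven dispatch: a key-to-category dict built once routes each entry, and values are accumulated directly into the pre-built output dict in one scan.
import Mathlib
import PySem

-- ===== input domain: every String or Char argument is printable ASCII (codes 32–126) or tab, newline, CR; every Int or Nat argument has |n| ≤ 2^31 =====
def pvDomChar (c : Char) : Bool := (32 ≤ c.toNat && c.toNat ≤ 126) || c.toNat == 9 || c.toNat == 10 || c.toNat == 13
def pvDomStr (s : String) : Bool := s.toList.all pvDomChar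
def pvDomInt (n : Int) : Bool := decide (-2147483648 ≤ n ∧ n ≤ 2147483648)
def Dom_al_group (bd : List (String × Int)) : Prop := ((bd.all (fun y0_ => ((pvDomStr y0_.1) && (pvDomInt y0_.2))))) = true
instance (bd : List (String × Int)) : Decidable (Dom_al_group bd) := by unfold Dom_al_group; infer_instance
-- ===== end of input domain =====

-- B replaces the comprehension-sum plus five .get() lookups by a table-driven dispatch: a key→category
-- dict routes each entry and the values are accumulated directly into the pre-built output dict (alternative decomposition, same cost).

-- ===== PORT A =====
def al_group (bd : List (String × Int)) : List (String × Int) :=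
  let d := PySem.Dict.mk bd
  [("Crossbar (VMM)", 0),
   ("ACAM (exp/log)", 0),
   ("CLB (add+reduce)",
      ((d.items.filter (fun p => PySem.Str.isIn "clb" p.1)).map Prod.snd).sum),
   ("DSP (MAC)",
      d.getD "dsp_gemm" 0 + d.getD "mul" 0 + d.getD "imc_conversion" 0),
   ("BRAM R/W",
      d.getD "sram_read" 0 + d.getD "sram_write" 0)]

-- ===== PORT B =====
-- the module-level CATEGORY table of Source B
def pvCategory : PySem.Dict String String :=
  PySem.Dict.mk
    [("dsp_gemm", "DSP (MAC)"),
     ("mul", "DSP (MAC)"),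
     ("imc_conversion", "DSP (MAC)"),
     ("sram_read", "BRAM R/W"),
     ("sram_write", "BRAM R/W")]

-- the body of Source B's loop: route the entry through the table (falling back to the CLB
-- category on a "clb" substring) and bump that slot of the output dict
def pvStep (out : PySem.Dict String Int) (p : String × Int) : PySem.Dict String Int :=
  let c0 := pvCategory.get? p.1
  let c := if c0 = none ∧ PySem.Str.isIn "clb" p.1
           then some "CLB (add+reduce)" else c0
  match c with
  | some c => out.insert c (out.getD c 0 + p.2)
  | none => out

def al_group_alt (bd : List (String × Int)) : List (String × Int) :=
  (bd.foldl pvStep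
    (PySem.Dict.mk
      [("Crossbar (VMM)", 0),
       ("ACAM (exp/log)", 0),
       ("CLB (add+reduce)", 0),
       ("DSP (MAC)", 0),
       ("BRAM R/W", 0)])).items

-- ===== PRECONDITION & SPEC =====
-- Pre_ excludes association lists with duplicate keys: they cannot arise from a Python dict argument, so neither Python ever sees them.
def Pre_al_group (bd : List (String × Int)) : Prop := (bd.map Prod.fst).Nodup
instance (bd : List (String × Int)) : Decidable (Pre_al_group bd) := by unfold Pre_al_group; infer_instance
def pvWitness_al_group : (List (String × Int)) := [("clb_route", 3), ("mul", 2), ("sram_read", 1)]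
def Spec_al_group (bd : List (String × Int)) (out : List (String × Int)) : Prop := out = al_group_alt bd
instance (bd : List (String × Int)) (out : List (String × Int)) : Decidable (Spec_al_group bd out) := by unfold Spec_al_group; infer_instance

-- ===== CLAIM (what is proved, stated in full; the proofs are below) =====
def Claim_equal_al_group : Prop := ∀ (bd : List (String × Int)), Dom_al_group bd → Pre_al_group bd → Spec_al_group bd (al_group bd)

-- ===== LEMMAS AND PROOFS =====

-- the invariant shape of B's output dict during the fold
def pvOutD (c d b : Int) : PySem.Dict String Int :=
  PySem.Dict.mk
    [("Crossbar (VMM)", 0),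
     ("ACAM (exp/log)", 0),
     ("CLB (add+reduce)", c),
     ("DSP (MAC)", d),
     ("BRAM R/W", b)]

-- one step of B's dispatching fold bumps exactly the category of the key
theorem stepB (k : String) (v c d b : Int) :
    pvStep (pvOutD c d b) (k, v)
    = pvOutD (if PySem.Str.isIn "clb" k then c + v else c)
        (if k = "dsp_gemm" ∨ k = "mul" ∨ k = "imc_conversion" then d + v else d)
        (if k = "sram_read" ∨ k = "sram_write" then b + v else b) := by
  by_cases h1 : k = "dsp_gemm"
  · subst h1
    simp [pvStep, pvCategory, pvOutD, PySem.Dict.insert, PySem.Dict.getD_eq_get?_getD, PySem.Dict.get?, PySem.Dict.contains]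
    intro h; exact absurd h (by decide)
  · by_cases h2 : k = "mul"
    · subst h2
      simp [pvStep, pvCategory, pvOutD, PySem.Dict.insert, PySem.Dict.getD_eq_get?_getD, PySem.Dict.get?, PySem.Dict.contains]
      intro h; exact absurd h (by decide)
    · by_cases h3 : k = "imc_conversion"
      · subst h3
        simp [pvStep, pvCategory, pvOutD, PySem.Dict.insert, PySem.Dict.getD_eq_get?_getD, PySem.Dict.get?, PySem.Dict.contains]
        intro h; exact absurd h (by decide)
      · by_cases h4 : k = "sram_read"
        · subst h4
          simp [pvStep, pvCategory, pvOutD, PySem.Dict.insert, PySem.Dict.getD_eq_get?_getD, PySem.Dict.get?, PySem.Dict.contains]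
          intro h; exact absurd h (by decide)
        · by_cases h5 : k = "sram_write"
          · subst h5
            simp [pvStep, pvCategory, pvOutD, PySem.Dict.insert, PySem.Dict.getD_eq_get?_getD, PySem.Dict.get?, PySem.Dict.contains]
            intro h; exact absurd h (by decide)
          · -- k matches none of the table keys: CATEGORY.get(k) is None
            have hc0 : pvCategory.get? k = none := by
              simp [pvCategory, PySem.Dict.get?_mk_cons,
                Ne.symm h1, Ne.symm h2, Ne.symm h3, Ne.symm h4, Ne.symm h5]
              simp [PySem.Dict.get?]
            by_cases hclb : PySem.Str.isIn "clb" k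
            · simp only [pvStep, hc0, hclb, and_true]
              simp [pvOutD, PySem.Dict.insert, PySem.Dict.getD_eq_get?_getD, PySem.Dict.get?, PySem.Dict.contains, h1, h2, h3, h4, h5]
            · have hf : PySem.Chars.isIn ['c', 'l', 'b'] k.toList = false := by
                simpa [PySem.Str.isIn] using hclb
              simp [pvStep, hc0, hf, h1, h2, h3, h4, h5]

-- total of the values whose key satisfies a boolean predicate
def pvSel (q : String → Bool) (bd : List (String × Int)) : Int :=
  ((bd.filter (fun p => q p.1)).map Prod.snd).sum

theorem pvSel_cons (q : String → Bool) (k : String) (v : Int) (rest : List (String × Int)) :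
    pvSel q ((k, v) :: rest) = (if q k then v else 0) + pvSel q rest := by
  by_cases h : q k <;> simp [pvSel, h]

-- the whole fold computes the three selective sums
theorem foldB_eq (bd : List (String × Int)) (c d b : Int) :
    bd.foldl pvStep (pvOutD c d b)
    = pvOutD (c + pvSel (fun k => PySem.Str.isIn "clb" k) bd)
        (d + pvSel (fun k => decide (k = "dsp_gemm" ∨ k = "mul" ∨ k = "imc_conversion")) bd)
        (b + pvSel (fun k => decide (k = "sram_read" ∨ k = "sram_write")) bd) := by
  induction bd generalizing c d b with
  | nil => simp [pvSel]
  | cons p t ih =>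
      rcases p with ⟨k, v⟩
      rw [List.foldl_cons, stepB, ih]
      simp only [pvSel_cons, decide_eq_true_eq, pvOutD, PySem.Dict.mk.injEq, List.cons.injEq,
        Prod.mk.injEq, and_true, true_and]
      refine ⟨?_, ?_, ?_⟩ <;> · split_ifs with h <;> ring

-- first-match getD over the raw item list
theorem getD_mk_cons (k x : String) (v : Int) (rest : List (String × Int)) :
    (PySem.Dict.mk ((k, v) :: rest)).getD x 0
      = if k = x then v else (PySem.Dict.mk rest).getD x 0 := by
  simp [PySem.Dict.getD_eq_get?_getD, PySem.Dict.get?_mk_cons]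
  by_cases h : k = x <;> simp [h]

theorem getD_mk_not_mem (x : String) (rest : List (String × Int))
    (h : x ∉ rest.map Prod.fst) : (PySem.Dict.mk rest).getD x 0 = 0 := by
  induction rest with
  | nil => simp [PySem.Dict.getD, PySem.Dict.get?]
  | cons p t ih =>
      simp only [List.map_cons, List.mem_cons, not_or] at h
      rw [show p = (p.1, p.2) from rfl, getD_mk_cons]
      simp [Ne.symm h.1, ih h.2]

theorem pvSel_eq_getD (x : String) (bd : List (String × Int))
    (hnd : (bd.map Prod.fst).Nodup) :
    pvSel (fun k => k = x) bd = (PySem.Dict.mk bd).getD x 0 := by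
  induction bd with
  | nil => simp [pvSel, PySem.Dict.getD, PySem.Dict.get?]
  | cons p t ih =>
      simp only [List.map_cons, List.nodup_cons] at hnd
      rw [show p = (p.1, p.2) from rfl, pvSel_cons, getD_mk_cons]
      by_cases h : p.1 = x
      · have hz : pvSel (fun k => decide (k = x)) t = 0 := by
          rw [ih hnd.2, getD_mk_not_mem x t (h ▸ (by simpa using hnd.1))]
        simp [h, hz]
      · simp [h, ih hnd.2]

theorem pvSel_or (q r : String → Bool) (bd : List (String × Int))
    (hx : ∀ k, q k = true → r k = false) :
    pvSel (fun k => q k || r k) bd = pvSel q bd + pvSel r bd := by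
  induction bd with
  | nil => simp [pvSel]
  | cons p t ih =>
      rw [show p = (p.1, p.2) from rfl]
      simp only [pvSel_cons, ih]
      by_cases hq : q p.1
      · simp [hq, hx _ hq]; ring
      · by_cases hr : r p.1 <;> simp [hq, hr] <;> ring

-- ===== VERDICT (by name: the statement is the Claim_ definition above) =====
theorem al_group_spec : Claim_equal_al_group := by
  intro bd _hdom hpre
  show _ = (bd.foldl pvStep (pvOutD 0 0 0)).items
  rw [foldB_eq]
  simp only [zero_add]
  have h2 : pvSel (fun k => decide (k = "dsp_gemm" ∨ k = "mul" ∨ k = "imc_conversion")) bd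
      = (PySem.Dict.mk bd).getD "dsp_gemm" 0 + (PySem.Dict.mk bd).getD "mul" 0
        + (PySem.Dict.mk bd).getD "imc_conversion" 0 := by
    have e1 : (fun k : String => decide (k = "dsp_gemm" ∨ k = "mul" ∨ k = "imc_conversion"))
        = fun k => (decide (k = "dsp_gemm") || (decide (k = "mul") || decide (k = "imc_conversion"))) := by
      funext k; by_cases ha : k = "dsp_gemm" <;> by_cases hb : k = "mul" <;> simp [ha, hb]
    rw [e1, pvSel_or _ _ _ (by intro k hk; simp at hk ⊢; subst hk; decide),
        pvSel_or _ _ _ (by intro k hk; simp at hk ⊢; subst hk; decide)]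
    simp only [pvSel_eq_getD _ _ hpre]
    ring
  have h3 : pvSel (fun k => decide (k = "sram_read" ∨ k = "sram_write")) bd
      = (PySem.Dict.mk bd).getD "sram_read" 0 + (PySem.Dict.mk bd).getD "sram_write" 0 := by
    have e1 : (fun k : String => decide (k = "sram_read" ∨ k = "sram_write"))
        = fun k => (decide (k = "sram_read") || decide (k = "sram_write")) := by
      funext k; by_cases ha : k = "sram_read" <;> simp [ha]
    rw [e1, pvSel_or _ _ _ (by intro k hk; simp at hk ⊢; subst hk; decide)]
    simp only [pvSel_eq_getD _ _ hpre]
  rw [h2, h3]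
  rfl
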